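-- pv_equiv track=rewrite | github.com/KelvinHo995/Wumpus-World | CODE/inference.py | precompute_adjacency
-- ===== SOURCE A (Python) =====
-- from collections import defaultdict
--
-- def precompute_adjacency(size):
--     adjacency = defaultdict(set)
--     for i in range(size):
--         for j in range(size):
--             for dx, dy in [(0,1), (1,0), (0,-1), (-1,0)]:
--                 ni, nj = i + dx, j + dy
--                 if 0 <= ni < size and 0 <= nj < size:
--                     adjacency[(i, j)].add((ni, nj))
--     return adjacency
-- ===== SOURCE B (Python) =====
-- from collections import defaultdict
--
-- def _row_template(size, has_up, has_down):
--     # admitted neighbour offsets for every column of one row class, computed once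
--     tmpl = []
--     for j in range(size):
--         offs = []
--         if j + 1 < size:
--             offs.append((0, 1))
--         if has_down:
--             offs.append((1, 0))
--         if j > 0:
--             offs.append((0, -1))
--         if has_up:
--             offs.append((-1, 0))
--         tmpl.append((j, offs))
--     return tmpl
--
-- def precompute_adjacency(size):
--     adjacency = defaultdict(set)
--     if size <= 0:
--         return adjacency
--     first = _row_template(size, False, size > 1)
--     mid = _row_template(size, True, True)
--     last = _row_template(size, size > 1, False)
--     for i in range(size):
--         tmpl = first if i == 0 else (last if i == size - 1 else mid)
--         for j, offs in tmpl:
--             if offs: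
--                 adjacency[(i, j)] = {(i + dx, j + dy) for dx, dy in offs}
--     return adjacency
-- ===== Notes on version B (the rewrite author's own statement) =====
-- stated objective: alternative
-- what changed: Instead of probing four direction deltas with two-sided bounds checks at every cell, B precomputes three row templates (top/middle/bottom row classes) of admitted neighbour offsets once, then stamps the chosen template across each row, assigning each cell's neighbour set directly from its precomputed offset list.
import Mathlib
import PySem

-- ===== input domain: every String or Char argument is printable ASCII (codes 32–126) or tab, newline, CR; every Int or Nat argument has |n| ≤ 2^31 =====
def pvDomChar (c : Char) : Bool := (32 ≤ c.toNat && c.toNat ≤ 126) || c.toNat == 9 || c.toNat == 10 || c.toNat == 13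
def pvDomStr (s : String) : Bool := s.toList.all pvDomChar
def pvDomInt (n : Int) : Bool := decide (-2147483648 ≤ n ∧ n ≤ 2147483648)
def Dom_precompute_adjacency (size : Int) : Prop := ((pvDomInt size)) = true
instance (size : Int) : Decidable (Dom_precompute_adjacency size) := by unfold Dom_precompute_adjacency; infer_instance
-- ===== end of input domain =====

-- B precomputes three row templates (top/middle/bottom) of admitted neighbour offsets once
-- and stamps them across the rows, instead of A's per-cell four-direction probing with
-- two-sided bounds checks; same cost, different decomposition.

-- ===== PORT A =====
def pvDirsA : List (Int × Int) := [(0, 1), (1, 0), (0, -1), (-1, 0)]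

-- inner 'for dx, dy in [...]' loop of A, over a dict keyed by cells
def pvInnerA (size i j : Int) (d : PySem.Dict (Int × Int) (PySem.Set (Int × Int)))
    (dirs : List (Int × Int)) : PySem.Dict (Int × Int) (PySem.Set (Int × Int)) :=
  dirs.foldl (fun d dir =>
    let ni := i + dir.1
    let nj := j + dir.2
    if 0 ≤ ni ∧ ni < size ∧ 0 ≤ nj ∧ nj < size then
      d.modify (i, j) PySem.Set.empty (fun s => PySem.Set.add s (ni, nj))
    else d) d

def precompute_adjacency (size : Int) : List (Int × Int × List (Int × Int)) :=
  (((PySem.List.pyRange 0 size).foldl (fun d i =>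
      (PySem.List.pyRange 0 size).foldl (fun d j => pvInnerA size i j d pvDirsA) d)
    PySem.Dict.empty).items).map (fun kv => (kv.1.1, kv.1.2, kv.2))

-- ===== PORT B =====
-- _row_template of Source B: offsets admitted for every column of one row class
def pvRowTemplate (size : Int) (hasUp hasDown : Bool) : List (Int × List (Int × Int)) :=
  (PySem.List.pyRange 0 size).map (fun j =>
    (j, (if j + 1 < size then [((0 : Int), (1 : Int))] else []) ++
        (if hasDown then [(1, 0)] else []) ++
        (if 0 < j then [(0, -1)] else []) ++
        (if hasUp then [(-1, 0)] else [])))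

def precompute_adjacency_alt (size : Int) : List (Int × Int × List (Int × Int)) :=
  (if size ≤ 0 then (PySem.Dict.empty : PySem.Dict (Int × Int) (PySem.Set (Int × Int)))
   else
     let first := pvRowTemplate size false (decide (1 < size))
     let mid := pvRowTemplate size true true
     let last := pvRowTemplate size (decide (1 < size)) false
     (PySem.List.pyRange 0 size).foldl (fun d i =>
       let tmpl := if i = 0 then first else if i = size - 1 then last else mid
       tmpl.foldl (fun d joffs =>
         if joffs.2 ≠ [] then
           d.insert (i, joffs.1)
             (PySem.Set.ofList (joffs.2.map (fun dxy => (i + dxy.1, joffs.1 + dxy.2))))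
         else d) d) PySem.Dict.empty
  ).items.map (fun kv => (kv.1.1, kv.1.2, kv.2))

-- ===== PRECONDITION & SPEC =====
def Spec_precompute_adjacency (size : Int) (out : List (Int × Int × List (Int × Int))) : Prop := out = precompute_adjacency_alt size
instance (size : Int) (out : List (Int × Int × List (Int × Int))) : Decidable (Spec_precompute_adjacency size out) := by unfold Spec_precompute_adjacency; infer_instance

-- ===== CLAIM (what is proved, stated in full; the proofs are below) =====
def Claim_equal_precompute_adjacency : Prop := ∀ (size : Int), Dom_precompute_adjacency size → Spec_precompute_adjacency size (precompute_adjacency size)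

-- ===== LEMMAS AND PROOFS =====

-- the neighbour list both programs produce for an in-bounds cell, in A's insertion order
def pvNbrs (size i j : Int) : List (Int × Int) :=
  (if j + 1 < size then [(i, j + 1)] else []) ++
  (if i + 1 < size then [(i + 1, j)] else []) ++
  (if 0 < j then [(i, j - 1)] else []) ++
  (if 0 < i then [(i - 1, j)] else [])

-- offsets B's template carries for cell (i, j)
def pvOffs (size i j : Int) : List (Int × Int) :=
  (if j + 1 < size then [((0 : Int), (1 : Int))] else []) ++
  (if i + 1 < size then [(1, 0)] else []) ++
  (if 0 < j then [(0, -1)] else []) ++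
  (if 0 < i then [(-1, 0)] else [])

-- modifying a key absent from the dict appends the entry
lemma pv_modify_fresh {κ ν : Type} [BEq κ] [LawfulBEq κ] (d : PySem.Dict κ ν) (k : κ)
    (dflt : ν) (f : ν → ν) (h : d.contains k = false) :
    d.modify k dflt f = PySem.Dict.mk (d.items ++ [(k, f dflt)]) := by
  have hall : ∀ p ∈ d.items, ¬ ((p.1 == k) = true) := by
    simpa [PySem.Dict.contains, List.any_eq_false] using h
  have hfind : d.items.find? (fun p => p.1 == k) = none := List.find?_eq_none.mpr hall
  simp [PySem.Dict.modify, PySem.Dict.insert, PySem.Dict.getD, PySem.Dict.get?, h, hfind]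

-- modifying the freshly-appended last key updates it in place
lemma pv_modify_app {κ ν : Type} [BEq κ] [LawfulBEq κ] (d : PySem.Dict κ ν) (k : κ)
    (v dflt : ν) (f : ν → ν) (h : d.contains k = false) :
    (PySem.Dict.mk (d.items ++ [(k, v)])).modify k dflt f
      = PySem.Dict.mk (d.items ++ [(k, f v)]) := by
  have hall : ∀ p ∈ d.items, ¬ ((p.1 == k) = true) := by
    simpa [PySem.Dict.contains, List.any_eq_false] using h
  have hfind : d.items.find? (fun p => p.1 == k) = none := List.find?_eq_none.mpr hall
  have hcon : (PySem.Dict.mk (d.items ++ [(k, v)])).contains k = true := by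
    simp [PySem.Dict.contains, List.any_append]
  have hget : (PySem.Dict.mk (d.items ++ [(k, v)])).get? k = some v := by
    simp [PySem.Dict.get?, List.find?_append, hfind]
  have hmap : d.items.map (fun p => if p.1 == k then (k, f v) else p) = d.items := by
    have hcg : d.items.map (fun p => if p.1 == k then (k, f v) else p) = d.items.map id :=
      List.map_congr_left (fun p hp => by simp [hall p hp])
    rw [hcg, List.map_id]
  simp [PySem.Dict.modify, PySem.Dict.insert, PySem.Dict.getD, hcon, hget,
    List.map_append, hmap]

-- the set-level shadow of A's inner direction loop
def pvSetF (size i j : Int) (s : PySem.Set (Int × Int)) (dirs : List (Int × Int)) :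
    PySem.Set (Int × Int) :=
  dirs.foldl (fun s dir =>
    if 0 ≤ i + dir.1 ∧ i + dir.1 < size ∧ 0 ≤ j + dir.2 ∧ j + dir.2 < size then
      PySem.Set.add s (i + dir.1, j + dir.2) else s) s

lemma pv_inner_app (size i j : Int) (dirs : List (Int × Int)) :
    ∀ (d : PySem.Dict (Int × Int) (PySem.Set (Int × Int))) (s : PySem.Set (Int × Int)),
      d.contains (i, j) = false →
      pvInnerA size i j (PySem.Dict.mk (d.items ++ [((i, j), s)])) dirs
        = PySem.Dict.mk (d.items ++ [((i, j), pvSetF size i j s dirs)]) := by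
  induction dirs with
  | nil => intro d s h; simp [pvInnerA, pvSetF]
  | cons dir tl ih =>
    intro d s h
    simp only [pvInnerA, pvSetF, List.foldl_cons]
    by_cases hc : 0 ≤ i + dir.1 ∧ i + dir.1 < size ∧ 0 ≤ j + dir.2 ∧ j + dir.2 < size
    · rw [if_pos hc, if_pos hc, pv_modify_app d (i, j) s PySem.Set.empty
        (fun s => PySem.Set.add s (i + dir.1, j + dir.2)) h]
      exact ih d (PySem.Set.add s (i + dir.1, j + dir.2)) h
    · rw [if_neg hc, if_neg hc]
      exact ih d s h

lemma pv_add_ne_nil {s : PySem.Set (Int × Int)} {x : Int × Int} :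
    PySem.Set.add s x ≠ [] := by
  by_cases hm : s.contains x = true
  · rw [PySem.Set.add, if_pos hm]
    intro he
    rw [he] at hm
    simp at hm
  · rw [PySem.Set.add, if_neg hm]
    simp

lemma pv_setF_sub (size i j : Int) :
    ∀ (dirs : List (Int × Int)) (s : PySem.Set (Int × Int)),
      ∃ t, pvSetF size i j s dirs = s ++ t := by
  intro dirs
  induction dirs with
  | nil => intro s; exact ⟨[], by simp [pvSetF]⟩
  | cons dir tl ih =>
    intro s
    rw [show pvSetF size i j s (dir :: tl)
        = pvSetF size i j
            (if 0 ≤ i + dir.1 ∧ i + dir.1 < size ∧ 0 ≤ j + dir.2 ∧ j + dir.2 < size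
             then PySem.Set.add s (i + dir.1, j + dir.2) else s) tl from rfl]
    by_cases hc : 0 ≤ i + dir.1 ∧ i + dir.1 < size ∧ 0 ≤ j + dir.2 ∧ j + dir.2 < size
    · rw [if_pos hc]
      rcases ih (PySem.Set.add s (i + dir.1, j + dir.2)) with ⟨t, ht⟩
      by_cases hm : s.contains (i + dir.1, j + dir.2) = true
      · have ha : PySem.Set.add s (i + dir.1, j + dir.2) = s := by
          rw [PySem.Set.add, if_pos hm]
        rw [ha] at ht
        rw [ha]
        exact ⟨t, ht⟩
      · have ha : PySem.Set.add s (i + dir.1, j + dir.2) = s ++ [(i + dir.1, j + dir.2)] := by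
          rw [PySem.Set.add, if_neg hm]
        rw [ha] at ht
        rw [ha]
        exact ⟨(i + dir.1, j + dir.2) :: t, by rw [ht, List.append_assoc]; rfl⟩
    · rw [if_neg hc]
      exact ih s

lemma pv_inner_create (size i j : Int) :
    ∀ (dirs : List (Int × Int)) (d : PySem.Dict (Int × Int) (PySem.Set (Int × Int))),
      d.contains (i, j) = false →
      pvInnerA size i j d dirs
        = if pvSetF size i j PySem.Set.empty dirs = [] then d
          else PySem.Dict.mk (d.items ++ [((i, j), pvSetF size i j PySem.Set.empty dirs)]) := by
  intro dirs
  induction dirs with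
  | nil => intro d _; simp [pvInnerA, pvSetF, PySem.Set.empty]
  | cons dir tl ih =>
    intro d h
    rw [show pvInnerA size i j d (dir :: tl)
        = pvInnerA size i j
            (if 0 ≤ i + dir.1 ∧ i + dir.1 < size ∧ 0 ≤ j + dir.2 ∧ j + dir.2 < size
             then d.modify (i, j) PySem.Set.empty (fun s => PySem.Set.add s (i + dir.1, j + dir.2))
             else d) tl from rfl,
      show pvSetF size i j PySem.Set.empty (dir :: tl)
        = pvSetF size i j
            (if 0 ≤ i + dir.1 ∧ i + dir.1 < size ∧ 0 ≤ j + dir.2 ∧ j + dir.2 < size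
             then PySem.Set.add PySem.Set.empty (i + dir.1, j + dir.2) else PySem.Set.empty) tl from rfl]
    by_cases hc : 0 ≤ i + dir.1 ∧ i + dir.1 < size ∧ 0 ≤ j + dir.2 ∧ j + dir.2 < size
    · rw [if_pos hc, if_pos hc]
      rw [pv_modify_fresh d (i, j) PySem.Set.empty
        (fun s => PySem.Set.add s (i + dir.1, j + dir.2)) h]
      have hne : pvSetF size i j (PySem.Set.add PySem.Set.empty (i + dir.1, j + dir.2)) tl ≠ [] := by
        rcases pv_setF_sub size i j tl (PySem.Set.add PySem.Set.empty (i + dir.1, j + dir.2)) with ⟨t, ht⟩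
        rw [ht]
        intro he
        exact pv_add_ne_nil (List.append_eq_nil_iff.mp he).1
      rw [if_neg hne]
      exact pv_inner_app size i j tl d _ h
    · rw [if_neg hc, if_neg hc]
      exact ih d h

-- A's filtered direction scan produces exactly the filtered neighbour list
lemma pv_sets_eq (size i j : Int) (hi : 0 ≤ i) (hi' : i < size) (hj : 0 ≤ j) (hj' : j < size) :
    pvSetF size i j PySem.Set.empty pvDirsA = pvNbrs size i j := by
  have e1 : (0 ≤ i ∧ i < size ∧ 0 ≤ j + 1 ∧ j + 1 < size) ↔ (j + 1 < size) := by omega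
  have e2 : (0 ≤ i + 1 ∧ i + 1 < size ∧ 0 ≤ j ∧ j < size) ↔ (i + 1 < size) := by omega
  have e3 : (0 ≤ i ∧ i < size ∧ 0 ≤ j + -1 ∧ j + -1 < size) ↔ (0 < j) := by omega
  have e4 : (0 ≤ i + -1 ∧ i + -1 < size ∧ 0 ≤ j ∧ j < size) ↔ (0 < i) := by omega
  simp only [pvSetF, pvDirsA, pvNbrs, List.foldl_cons, List.foldl_nil, add_zero]
  rw [if_congr e1 rfl rfl, if_congr e2 rfl rfl, if_congr e3 rfl rfl, if_congr e4 rfl rfl,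
    show j + -1 = j - 1 from (sub_eq_add_neg j 1).symm,
    show i + -1 = i - 1 from (sub_eq_add_neg i 1).symm]
  have f1 : j - 1 ≠ j + 1 := by omega
  have f2 : i - 1 ≠ i + 1 := by omega
  have f3 : i ≠ i + 1 := by omega
  have f5 : j ≠ j + 1 := by omega
  have f6 : j ≠ j - 1 := by omega
  have f9 : i + 1 ≠ i := by omega
  have f10 : i - 1 ≠ i := by omega
  have f12 : j - 1 ≠ j := by omega
  split_ifs <;>
    simp [PySem.Set.add, PySem.Set.contains, PySem.Set.empty, Prod.ext_iff,
      f1, f2, f3, f5, f6, f9, f10, f12]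

lemma pv_nbrs_ne_nil (size i j : Int) (h2 : 2 ≤ size) (hj : 0 ≤ j) (hj' : j < size) :
    pvNbrs size i j ≠ [] := by
  unfold pvNbrs
  split_ifs <;> simp_all <;> omega

-- one full cell of A's scan, on a dict not yet holding that cell
lemma pv_step (size i j : Int) (d : PySem.Dict (Int × Int) (PySem.Set (Int × Int)))
    (h : d.contains (i, j) = false) (h2 : 2 ≤ size)
    (hi : 0 ≤ i) (hi' : i < size) (hj : 0 ≤ j) (hj' : j < size) :
    pvInnerA size i j d pvDirsA
      = PySem.Dict.mk (d.items ++ [((i, j), pvNbrs size i j)]) := by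
  rw [pv_inner_create size i j pvDirsA d h, pv_sets_eq size i j hi hi' hj hj',
    if_neg (pv_nbrs_ne_nil size i j h2 hj hj')]

-- one row of A's scan appends one entry per cell
lemma pv_row (size i : Int) (h2 : 2 ≤ size) (hi : 0 ≤ i) (hi' : i < size) :
    ∀ (js : List Int) (d : PySem.Dict (Int × Int) (PySem.Set (Int × Int))),
      (∀ j ∈ js, 0 ≤ j ∧ j < size) → js.Nodup → (∀ j ∈ js, d.contains (i, j) = false) →
      (js.foldl (fun d j => pvInnerA size i j d pvDirsA) d).items
        = d.items ++ js.map (fun j => ((i, j), pvNbrs size i j)) := by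
  intro js
  induction js with
  | nil => intro d _ _ _; simp
  | cons j tl ih =>
    intro d hb hn hf
    have hbj := hb j List.mem_cons_self
    simp only [List.foldl_cons]
    rw [pv_step size i j d (hf j List.mem_cons_self) h2 hi hi' hbj.1 hbj.2]
    rw [ih (PySem.Dict.mk (d.items ++ [((i, j), pvNbrs size i j)]))
      (fun j' hj' => hb j' (List.mem_cons_of_mem _ hj'))
      (List.nodup_cons.mp hn).2
      ?_]
    · simp
    · intro j' hj'
      have h1 := hf j' (List.mem_cons_of_mem _ hj')
      have hne : j ≠ j' := fun e => (List.nodup_cons.mp hn).1 (e ▸ hj')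
      simp only [PySem.Dict.contains, List.any_append, Bool.or_eq_false_iff] at h1 ⊢
      refine ⟨h1, ?_⟩
      simp [hne]

lemma pv_pyRange_nodup (size : Int) (h : 0 ≤ size) : (PySem.List.pyRange 0 size).Nodup := by
  have hsz : size = ((size.toNat : Nat) : Int) := by omega
  rw [hsz, PySem.List.pyRange_zero_natCast]
  exact List.nodup_range.map (fun a b e => by exact_mod_cast e)

-- the whole grid scan of A, rows processed in order
lemma pv_rows (size : Int) (h2 : 2 ≤ size) :
    ∀ (is : List Int) (d : PySem.Dict (Int × Int) (PySem.Set (Int × Int))),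
      (∀ i ∈ is, 0 ≤ i ∧ i < size) → is.Nodup →
      (∀ i ∈ is, ∀ jc : Int, d.contains (i, jc) = false) →
      (is.foldl (fun d i =>
          (PySem.List.pyRange 0 size).foldl (fun d j => pvInnerA size i j d pvDirsA) d) d).items
        = d.items ++ is.flatMap (fun i =>
            (PySem.List.pyRange 0 size).map (fun j => ((i, j), pvNbrs size i j))) := by
  intro is
  induction is with
  | nil => intro d _ _ _; simp
  | cons i tl ih =>
    intro d hb hn hf
    have hbi := hb i List.mem_cons_self
    simp only [List.foldl_cons]
    have hrow := pv_row size i h2 hbi.1 hbi.2 (PySem.List.pyRange 0 size) d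
      (fun j hj => by rw [PySem.List.mem_pyRange_one] at hj; exact hj)
      (pv_pyRange_nodup size (by omega))
      (fun j _ => hf i List.mem_cons_self j)
    have hdict : (PySem.List.pyRange 0 size).foldl (fun d j => pvInnerA size i j d pvDirsA) d
        = PySem.Dict.mk (d.items ++ (PySem.List.pyRange 0 size).map (fun j => ((i, j), pvNbrs size i j))) := by
      apply PySem.Dict.ext
      exact hrow
    rw [hdict]
    rw [ih (PySem.Dict.mk (d.items ++ (PySem.List.pyRange 0 size).map (fun j => ((i, j), pvNbrs size i j))))
      (fun i' hi' => hb i' (List.mem_cons_of_mem _ hi'))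
      (List.nodup_cons.mp hn).2
      ?_]
    · simp [List.append_assoc]
    · intro i' hi' jc
      have h1 := hf i' (List.mem_cons_of_mem _ hi') jc
      have hne : i ≠ i' := fun e => (List.nodup_cons.mp hn).1 (e ▸ hi')
      simp only [PySem.Dict.contains, List.any_append, Bool.or_eq_false_iff] at h1 ⊢
      refine ⟨h1, ?_⟩
      rw [List.any_eq_false]
      intro p hp
      rcases List.mem_map.mp hp with ⟨j'', _, he⟩
      subst he
      simp [hne]

lemma pv_pyRange_nil (size : Int) (h : size ≤ 0) : PySem.List.pyRange 0 size = [] := by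
  rw [List.eq_nil_iff_forall_not_mem]
  intro x hx
  rw [PySem.List.mem_pyRange_one] at hx
  omega

-- B's selected template for row i is the per-cell offsets list
lemma pv_tmpl_eq (size i : Int) (h2 : 2 ≤ size) (hi : 0 ≤ i) (hi' : i < size) :
    (if i = 0 then pvRowTemplate size false (decide (1 < size))
     else if i = size - 1 then pvRowTemplate size (decide (1 < size)) false
     else pvRowTemplate size true true)
      = (PySem.List.pyRange 0 size).map (fun j => (j, pvOffs size i j)) := by
  by_cases h0 : i = 0
  · rw [if_pos h0]
    subst h0
    unfold pvRowTemplate pvOffs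
    refine List.map_congr_left (fun j _ => ?_)
    simp [show ((1 : Int) < size) from by omega]
  · rw [if_neg h0]
    by_cases h1 : i = size - 1
    · rw [if_pos h1]
      subst h1
      unfold pvRowTemplate pvOffs
      refine List.map_congr_left (fun j _ => ?_)
      simp [show ((1 : Int) < size) from by omega, show ((0 : Int) < size - 1) from by omega]
    · rw [if_neg h1]
      unfold pvRowTemplate pvOffs
      refine List.map_congr_left (fun j _ => ?_)
      simp [show (i + 1 < size) from by omega, show ((0 : Int) < i) from by omega]

-- B's offsets shifted to cell (i, j) are the neighbour list
lemma pv_offs_shift (size i j : Int) :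
    (pvOffs size i j).map (fun dxy => (i + dxy.1, j + dxy.2)) = pvNbrs size i j := by
  unfold pvOffs pvNbrs
  split_ifs <;> simp [sub_eq_add_neg]

lemma pv_nbrs_nodup (size i j : Int) : (pvNbrs size i j).Nodup := by
  unfold pvNbrs
  split_ifs <;> simp [Prod.ext_iff] <;> omega

lemma pv_offs_ne_nil (size i j : Int) (h2 : 2 ≤ size) (hj : 0 ≤ j) (hj' : j < size) :
    pvOffs size i j ≠ [] := by
  unfold pvOffs
  split_ifs <;> simp_all <;> omega

-- one row of B's stamping appends one entry per cell
lemma pv_row_alt (size i : Int) (h2 : 2 ≤ size) (hi : 0 ≤ i) (hi' : i < size)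
    (d : PySem.Dict (Int × Int) (PySem.Set (Int × Int)))
    (hf : ∀ jc : Int, d.contains (i, jc) = false) :
    (((PySem.List.pyRange 0 size).map (fun j => (j, pvOffs size i j))).foldl
       (fun d joffs =>
         if joffs.2 ≠ [] then
           d.insert (i, joffs.1)
             (PySem.Set.ofList (joffs.2.map (fun dxy => (i + dxy.1, joffs.1 + dxy.2))))
         else d) d).items
      = d.items ++ (PySem.List.pyRange 0 size).map (fun j => ((i, j), pvNbrs size i j)) := by
  rw [List.foldl_map]
  have hcg : (PySem.List.pyRange 0 size).foldl
      (fun d j =>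
        if (pvOffs size i j) ≠ [] then
          d.insert (i, j)
            (PySem.Set.ofList ((pvOffs size i j).map (fun dxy => (i + dxy.1, j + dxy.2))))
        else d) d
      = (PySem.List.pyRange 0 size).foldl
        (fun d j => d.insert (i, j) (pvNbrs size i j)) d := by
    refine PySem.List.foldl_congr_mem _ _ _ _ (fun d' j hj => ?_)
    rw [PySem.List.mem_pyRange_one] at hj
    rw [if_pos (pv_offs_ne_nil size i j h2 hj.1 hj.2), pv_offs_shift,
      PySem.Set.ofList_eq_self_of_nodup _ (pv_nbrs_nodup size i j)]
  rw [hcg]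
  exact PySem.Dict.items_foldl_insert_fresh (PySem.List.pyRange 0 size)
    (fun j => ((i, j) : Int × Int)) (fun j => pvNbrs size i j) d
    (fun j _ => hf j)
    (by
      refine (pv_pyRange_nodup size (by omega)).map ?_
      intro a b e
      exact (Prod.mk.injEq _ _ _ _ ▸ e : i = i ∧ a = b).2)

-- the whole grid stamping of B, rows processed in order
lemma pv_rows_alt (size : Int) (h2 : 2 ≤ size) :
    ∀ (is : List Int) (d : PySem.Dict (Int × Int) (PySem.Set (Int × Int))),
      (∀ i ∈ is, 0 ≤ i ∧ i < size) → is.Nodup →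
      (∀ i ∈ is, ∀ jc : Int, d.contains (i, jc) = false) →
      (is.foldl (fun d i =>
          (((PySem.List.pyRange 0 size).map (fun j => (j, pvOffs size i j))).foldl
            (fun d joffs =>
              if joffs.2 ≠ [] then
                d.insert (i, joffs.1)
                  (PySem.Set.ofList (joffs.2.map (fun dxy => (i + dxy.1, joffs.1 + dxy.2))))
              else d) d)) d).items
        = d.items ++ is.flatMap (fun i =>
            (PySem.List.pyRange 0 size).map (fun j => ((i, j), pvNbrs size i j))) := by
  intro is
  induction is with
  | nil => intro d _ _ _; simp
  | cons i tl ih =>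
    intro d hb hn hf
    have hbi := hb i List.mem_cons_self
    simp only [List.foldl_cons]
    have hrow := pv_row_alt size i h2 hbi.1 hbi.2 d (hf i List.mem_cons_self)
    have hdict : (((PySem.List.pyRange 0 size).map (fun j => (j, pvOffs size i j))).foldl
        (fun d joffs =>
          if joffs.2 ≠ [] then
            d.insert (i, joffs.1)
              (PySem.Set.ofList (joffs.2.map (fun dxy => (i + dxy.1, joffs.1 + dxy.2))))
          else d) d)
        = PySem.Dict.mk (d.items ++ (PySem.List.pyRange 0 size).map (fun j => ((i, j), pvNbrs size i j))) := by
      apply PySem.Dict.ext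
      exact hrow
    rw [hdict]
    rw [ih (PySem.Dict.mk (d.items ++ (PySem.List.pyRange 0 size).map (fun j => ((i, j), pvNbrs size i j))))
      (fun i' hi' => hb i' (List.mem_cons_of_mem _ hi'))
      (List.nodup_cons.mp hn).2
      ?_]
    · simp [List.append_assoc]
    · intro i' hi' jc
      have h1 := hf i' (List.mem_cons_of_mem _ hi') jc
      have hne : i ≠ i' := fun e => (List.nodup_cons.mp hn).1 (e ▸ hi')
      simp only [PySem.Dict.contains, List.any_append, Bool.or_eq_false_iff] at h1 ⊢
      refine ⟨h1, ?_⟩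
      rw [List.any_eq_false]
      intro p hp
      rcases List.mem_map.mp hp with ⟨j'', _, he⟩
      subst he
      simp [hne]

-- ===== VERDICT (by name: the statement is the Claim_ definition above) =====
theorem precompute_adjacency_spec : Claim_equal_precompute_adjacency := by
  intro size _
  unfold Spec_precompute_adjacency
  by_cases h2 : 2 ≤ size
  · unfold precompute_adjacency precompute_adjacency_alt
    rw [if_neg (by omega : ¬ size ≤ 0)]
    rw [pv_rows size h2 (PySem.List.pyRange 0 size) PySem.Dict.empty
      (fun i hi => by rw [PySem.List.mem_pyRange_one] at hi; exact hi)
      (pv_pyRange_nodup size (by omega))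
      (fun i _ jc => by simp [PySem.Dict.empty, PySem.Dict.contains])]
    have hsel : ((PySem.List.pyRange 0 size).foldl (fun d i =>
        (if i = 0 then pvRowTemplate size false (decide (1 < size))
         else if i = size - 1 then pvRowTemplate size (decide (1 < size)) false
         else pvRowTemplate size true true).foldl
          (fun d joffs =>
            if joffs.2 ≠ [] then
              d.insert (i, joffs.1)
                (PySem.Set.ofList (joffs.2.map (fun dxy => (i + dxy.1, joffs.1 + dxy.2))))
            else d) d) PySem.Dict.empty)
        = ((PySem.List.pyRange 0 size).foldl (fun d i =>
          (((PySem.List.pyRange 0 size).map (fun j => (j, pvOffs size i j))).foldl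
            (fun d joffs =>
              if joffs.2 ≠ [] then
                d.insert (i, joffs.1)
                  (PySem.Set.ofList (joffs.2.map (fun dxy => (i + dxy.1, joffs.1 + dxy.2))))
              else d) d)) PySem.Dict.empty) := by
      refine PySem.List.foldl_congr_mem _ _ _ _ (fun d' i hi => ?_)
      rw [PySem.List.mem_pyRange_one] at hi
      rw [pv_tmpl_eq size i h2 hi.1 hi.2]
    rw [hsel]
    rw [pv_rows_alt size h2 (PySem.List.pyRange 0 size) PySem.Dict.empty
      (fun i hi => by rw [PySem.List.mem_pyRange_one] at hi; exact hi)
      (pv_pyRange_nodup size (by omega))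
      (fun i _ jc => by simp [PySem.Dict.empty, PySem.Dict.contains])]
  · by_cases h1 : size = 1
    · subst h1; decide
    · have hz : size ≤ 0 := by omega
      unfold precompute_adjacency precompute_adjacency_alt
      rw [if_pos hz, pv_pyRange_nil size hz]
      simp [PySem.Dict.empty]
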